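-- pv_equiv track=rewrite | github.com/JudsonAbhishek/Gfg_codes | Difficulty: Basic/Wrong Ball/wrong-ball.py | countWrongPlacedBalls
-- ===== SOURCE A (Python) =====
-- def countWrongPlacedBalls(s):
--     c=0
--     for i in range(len(s)):
--         if i%2!=0 and s[i]=="R":
--             c+=1
--         if i%2==0 and s[i]=="B":
--             c+=1
--     return c
-- ===== SOURCE B (Python) =====
-- def countWrongPlacedBalls(s):
--     c = 0
--     while s:
--         if s[0] == "B":
--             c += 1
--         if len(s) > 1 and s[1] == "R":
--             c += 1
--         s = s[2:]
--     return c
-- ===== Notes on version B (the rewrite author's own statement) =====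
-- stated objective: simpler
-- what changed: Replaces the index loop with parity tests i%2 by a while loop that consumes the string two characters at a time (check position 0 for 'B', position 1 for 'R', then drop the pair), removing index arithmetic entirely.
import Mathlib
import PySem

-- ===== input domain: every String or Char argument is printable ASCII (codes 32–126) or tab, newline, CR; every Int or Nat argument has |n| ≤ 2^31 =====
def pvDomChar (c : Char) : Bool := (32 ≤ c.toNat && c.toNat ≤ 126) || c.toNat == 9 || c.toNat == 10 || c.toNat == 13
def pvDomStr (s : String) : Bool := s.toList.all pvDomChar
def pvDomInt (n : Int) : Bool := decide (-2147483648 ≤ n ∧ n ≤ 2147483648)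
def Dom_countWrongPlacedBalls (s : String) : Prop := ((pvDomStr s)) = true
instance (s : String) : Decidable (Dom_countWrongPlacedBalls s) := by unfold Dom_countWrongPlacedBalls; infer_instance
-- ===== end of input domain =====

-- B replaces A's index loop with parity tests by a while loop consuming two characters at a time (simpler: no index arithmetic).

-- ===== PORT A =====
-- for i in range(len(s)): if i%2!=0 and s[i]=="R": c+=1; if i%2==0 and s[i]=="B": c+=1
-- s[i] is always in range here, so pyGetD is exact.
def countWrongPlacedBalls (s : String) : Int :=
  (PySem.List.pyRange 0 (PySem.Str.len s) 1).foldl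
    (fun c i =>
      let c := if PySem.Int.mod i 2 ≠ 0 ∧ PySem.List.pyGetD s.toList i ' ' = 'R' then c + 1 else c
      if PySem.Int.mod i 2 = 0 ∧ PySem.List.pyGetD s.toList i ' ' = 'B' then c + 1 else c)
    0

-- ===== PORT B =====
-- while s: if s[0]=="B": c+=1; if len(s)>1 and s[1]=="R": c+=1; s = s[2:]
def pvGoB : List Char → Int → Int
  | [], c => c
  | [a], c => if a = 'B' then c + 1 else c
  | a :: b :: rest, c =>
      let c := if a = 'B' then c + 1 else c
      let c := if b = 'R' then c + 1 else c
      pvGoB rest c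

def countWrongPlacedBalls_alt (s : String) : Int := pvGoB s.toList 0

-- ===== PRECONDITION & SPEC =====
def Spec_countWrongPlacedBalls (s : String) (out : Int) : Prop := out = countWrongPlacedBalls_alt s
instance (s : String) (out : Int) : Decidable (Spec_countWrongPlacedBalls s out) := by unfold Spec_countWrongPlacedBalls; infer_instance

-- ===== CLAIM (what is proved, stated in full; the proofs are below) =====
def Claim_equal_countWrongPlacedBalls : Prop := ∀ (s : String), Dom_countWrongPlacedBalls s → Spec_countWrongPlacedBalls s (countWrongPlacedBalls s)

-- ===== LEMMAS AND PROOFS =====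

-- two-at-a-time induction on lists, matching pvGoB's recursion shape
lemma pv_two_step {P : List Char → Prop} (h0 : P []) (h1 : ∀ a, P [a])
    (h2 : ∀ a b rest, P rest → P (a :: b :: rest)) : ∀ cs, P cs := by
  have key : ∀ n cs, List.length cs ≤ n → P cs := by
    intro n
    induction n with
    | zero => intro cs h; cases cs with
      | nil => exact h0
      | cons a t => simp at h
    | succ n ih =>
      intro cs h
      match cs with
      | [] => exact h0
      | [a] => exact h1 a
      | a :: b :: rest =>
        exact h2 a b rest (ih rest (by simp at h ⊢; omega))
  exact fun cs => key cs.length cs le_rfl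

-- A's indexed fold, started at an even index k with remainder cs = full.drop k, equals B's pair-consuming recursion on cs.
lemma pv_fold_eq_goB (full : List Char) :
    ∀ cs : List Char, ∀ k : Nat, full.drop k = cs → k % 2 = 0 → ∀ c : Int,
    (PySem.List.pyRange (k : Int) ((k : Int) + cs.length) 1).foldl
      (fun c i =>
        let c := if PySem.Int.mod i 2 ≠ 0 ∧ PySem.List.pyGetD full i ' ' = 'R' then c + 1 else c
        if PySem.Int.mod i 2 = 0 ∧ PySem.List.pyGetD full i ' ' = 'B' then c + 1 else c)
      c = pvGoB cs c := by
  intro cs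
  induction cs using pv_two_step with
  | h0 =>
      intro k _ _ c
      simp [PySem.List.pyRange_one_eq_nil, pvGoB]
  | h1 a =>
      intro k hdrop hpar c
      have hget : PySem.List.pyGetD full (k : Int) ' ' = a := by
        rw [PySem.List.pyGetD_natCast]
        have h0 : (full.drop k)[0]? = some a := by simp [hdrop]
        rw [List.getElem?_drop] at h0
        simp at h0
        simp [List.getD, h0]
      have hone : PySem.List.pyRange (k : Int) ((k : Int) + 1) 1 = [(k : Int)] :=
        PySem.List.pyRange_one_singleton _
      have hdvd : (2 : Int) ∣ (k : Int) := by omega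
      have hodd : ¬ ((k : Int) % 2 = 1) := by omega
      simp [hone, hget, pvGoB, hdvd, hodd]
  | h2 a b rest ih =>
      intro k hdrop hpar c
      have hlen : full.drop k ≠ [] := by simp [hdrop]
      have hk : k < full.length := by
        by_contra h; exact hlen (List.drop_eq_nil_of_le (by omega))
      have hgetk : PySem.List.pyGetD full (k : Int) ' ' = a := by
        rw [PySem.List.pyGetD_natCast]
        have h0 : (full.drop k)[0]? = some a := by simp [hdrop]
        rw [List.getElem?_drop] at h0
        simp at h0
        simp [List.getD, h0]
      have hgetk1 : PySem.List.pyGetD full ((k : Int) + 1) ' ' = b := by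
        have : ((k : Int) + 1) = ((k + 1 : Nat) : Int) := by push_cast; ring
        rw [this, PySem.List.pyGetD_natCast]
        have h0 : (full.drop k)[1]? = some b := by simp [hdrop]
        rw [List.getElem?_drop] at h0
        simp [List.getD, h0]
      have hmodk : PySem.Int.mod (k : Int) 2 = 0 := by
        rw [PySem.Int.mod_eq_emod_of_pos (by norm_num)]; omega
      have hmodk1 : PySem.Int.mod ((k : Int) + 1) 2 = 1 := by
        rw [PySem.Int.mod_eq_emod_of_pos (by norm_num)]; omega
      have hdrop2 : full.drop (k + 2) = rest := by
        rw [← List.drop_drop, hdrop]; rfl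
      have hc1 : ((k : Int)) < (k : Int) + (a :: b :: rest).length := by
        simp; omega
      have hc2 : ((k : Int) + 1) < (k : Int) + (a :: b :: rest).length := by
        simp
      rw [PySem.List.pyRange_one_cons hc1, PySem.List.pyRange_one_cons hc2]
      simp only [List.foldl_cons, hgetk, hgetk1, hmodk, hmodk1]
      have harg : (k : Int) + 1 + 1 = ((k + 2 : Nat) : Int) := by push_cast; ring
      have hend : (k : Int) + ((a :: b :: rest).length : Int)
          = ((k + 2 : Nat) : Int) + (rest.length : Int) := by
        simp [List.length_cons]; ring
      rw [harg, hend, ih (k + 2) hdrop2 (by omega)]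
      simp [pvGoB]

-- ===== VERDICT (by name: the statement is the Claim_ definition above) =====
theorem countWrongPlacedBalls_spec : Claim_equal_countWrongPlacedBalls := by
  intro s _
  unfold Spec_countWrongPlacedBalls countWrongPlacedBalls countWrongPlacedBalls_alt
  have h := pv_fold_eq_goB s.toList s.toList 0 (by simp) (by simp) 0
  simpa [PySem.Str.len] using h
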